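-- pv_equiv track=rewrite | github.com/eselyavka/python | leetcode/solutions_02400/solution_02453.py | destroyTargets
-- ===== SOURCE A (Python) =====
-- import collections
--
-- def destroyTargets(nums, space):
--     """
--     :type nums: List[int]
--     :type space: int
--     :rtype: int
--     """
--     d = collections.defaultdict(int)
--
--     for num in nums:
--         d[num % space] += 1
--
--     total_max = max(d.values())
--
--     ans = float("+inf")
--     for num in nums:
--         if d[num % space] == total_max:
--             ans = min(ans, num)
--
--     return ans
-- ===== SOURCE B (Python) =====
-- def destroyTargets(nums, space):
--     buckets = {}
--     for num in nums:
--         r = num % space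
--         b = buckets.get(r)
--         buckets[r] = (1, num) if b is None else (b[0] + 1, min(b[1], num))
--     best = None
--     for c, m in buckets.values():
--         if best is None or c > best[0] or (c == best[0] and m < best[1]):
--             best = (c, m)
--     return best[1]
-- ===== Notes on version B (the rewrite author's own statement) =====
-- stated objective: alternative
-- what changed: B makes one enriched pass building a dict residue -> (count, min element of that residue class) and then picks the answer by scanning the dict values with a (count desc, min asc) comparison, instead of A's three scans (count dict, max over values, second full scan of nums filtering by max count).
import Mathlib
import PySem

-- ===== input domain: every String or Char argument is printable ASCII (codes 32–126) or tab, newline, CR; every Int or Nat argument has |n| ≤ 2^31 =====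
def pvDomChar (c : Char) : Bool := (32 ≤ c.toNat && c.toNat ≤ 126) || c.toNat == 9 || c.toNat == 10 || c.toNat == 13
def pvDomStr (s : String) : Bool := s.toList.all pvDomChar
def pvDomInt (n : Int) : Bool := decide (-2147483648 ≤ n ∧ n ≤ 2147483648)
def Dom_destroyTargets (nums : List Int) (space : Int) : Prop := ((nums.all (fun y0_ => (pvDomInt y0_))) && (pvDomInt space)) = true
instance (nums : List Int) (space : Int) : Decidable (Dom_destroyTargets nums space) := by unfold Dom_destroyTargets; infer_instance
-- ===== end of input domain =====

-- B replaces A's three scans (count dict, max over values, second scan of nums) by one enriched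
-- dict pass (residue -> (count, min)) plus a scan over the dict values; equivalence of the RETURN value.

-- ===== PORT A =====
-- the counting loop 'for num in nums: d[num % space] += 1'
def aCount (nums : List Int) (space : Int) : PySem.Dict Int Int :=
  nums.foldl (fun d num => d.modify (PySem.Int.mod num space) 0 (· + 1)) PySem.Dict.empty

def destroyTargets (nums : List Int) (space : Int) : Int :=
  let d := aCount nums space
  -- max(d.values()): raises ValueError on empty nums — excluded by Pre_; .getD 0 is never used there
  let total_max := (PySem.List.max? d.values (fun x => x)).getD 0
  -- ans = float('+inf') is modelled as `none`; min(ans, num) = num when ans is still +inf.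
  -- On Pre_ the final ans is always `some` (the +inf float is never returned), so `.getD 0` is never used.
  (nums.foldl (fun (ans : Option Int) num =>
      if d.getD (PySem.Int.mod num space) 0 = total_max then
        some (ans.elim num (fun a => min a num))
      else ans) none).getD 0

-- ===== PORT B =====
-- the enriched pass: buckets[r] = (1, num) if buckets.get(r) is None else (c + 1, min(m, num))
def bBuckets (nums : List Int) (space : Int) : PySem.Dict Int (Int × Int) :=
  nums.foldl (fun d num =>
    d.insert (PySem.Int.mod num space)
      (match d.get? (PySem.Int.mod num space) with
       | none => (1, num)
       | some b => (b.1 + 1, min b.2 num))) PySem.Dict.empty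

-- loop body: if best is None or c > best[0] or (c == best[0] and m < best[1]): best = (c, m)
def bSel (best : Option (Int × Int)) (cm : Int × Int) : Option (Int × Int) :=
  match best with
  | none => some cm
  | some b => if b.1 < cm.1 ∨ (cm.1 = b.1 ∧ cm.2 < b.2) then some cm else some b

def destroyTargets_alt (nums : List Int) (space : Int) : Int :=
  -- best[1] on best = None raises TypeError (empty nums) — excluded by Pre_; .elim 0 is never used there
  ((bBuckets nums space).values.foldl bSel none).elim 0 (fun b => b.2)

-- ===== PRECONDITION & SPEC =====
-- Pre_ excludes exactly the inputs where Python A raises: empty nums (ValueError from max())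
-- and space = 0 (ZeroDivisionError from %).
def Pre_destroyTargets (nums : List Int) (space : Int) : Prop := nums ≠ [] ∧ space ≠ 0
instance (nums : List Int) (space : Int) : Decidable (Pre_destroyTargets nums space) := by
  unfold Pre_destroyTargets; infer_instance

def pvWitness_destroyTargets : List Int × Int := ([1, 2, 4], 3)

def Spec_destroyTargets (nums : List Int) (space : Int) (out : Int) : Prop := out = destroyTargets_alt nums space
instance (nums : List Int) (space : Int) (out : Int) : Decidable (Spec_destroyTargets nums space out) := by unfold Spec_destroyTargets; infer_instance

-- ===== CLAIM (what is proved, stated in full; the proofs are below) =====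
def Claim_equal_destroyTargets : Prop := ∀ (nums : List Int) (space : Int), Dom_destroyTargets nums space → Pre_destroyTargets nums space → Spec_destroyTargets nums space (destroyTargets nums space)

-- ===== LEMMAS AND PROOFS =====

theorem aCount_getD (nums : List Int) (space r : Int) :
    (aCount nums space).getD r 0 = ((nums.map (fun n => PySem.Int.mod n space)).count r : Int) := by
  unfold aCount
  have h := List.foldl_map (f := fun n => PySem.Int.mod n space)
    (g := fun (d : PySem.Dict Int Int) (r : Int) => d.modify r 0 (· + 1)) (l := nums) (init := PySem.Dict.empty)
  rw [← h, PySem.Dict.getD_foldl_modify_add_one]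
  simp

theorem aCount_keys (nums : List Int) (space : Int) :
    (aCount nums space).keys = PySem.Set.ofList (nums.map (fun n => PySem.Int.mod n space)) := by
  unfold aCount
  rw [PySem.Dict.keys_foldl_modify_key]
  simp [PySem.Set.update_nil_left]

theorem aCount_nodup (nums : List Int) (space : Int) : (aCount nums space).keys.Nodup := by
  unfold aCount
  exact PySem.Dict.nodup_keys_foldl_modify_key _ _ _ _ _ (by simp [PySem.Dict.keys_empty])

def gstep (o : Option (Int × Int)) (n : Int) : Option (Int × Int) :=
  some (match o with
        | none => (1, n)
        | some b => (b.1 + 1, min b.2 n))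

theorem bBuckets_get?_aux (space : Int) (l : List Int) (d : PySem.Dict Int (Int × Int)) (r : Int) :
    (l.foldl (fun d num =>
      d.insert (PySem.Int.mod num space)
        (match d.get? (PySem.Int.mod num space) with
         | none => (1, num)
         | some b => (b.1 + 1, min b.2 num))) d).get? r
    = (l.filter (fun n => PySem.Int.mod n space == r)).foldl gstep (d.get? r) := by
  induction l generalizing d with
  | nil => simp
  | cons x t ih =>
    simp only [List.foldl_cons, ih]
    by_cases hx : PySem.Int.mod x space = r
    · rw [List.filter_cons_of_pos (by simp [hx]), List.foldl_cons]
      rw [hx, PySem.Dict.get?_insert_self]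
      simp [gstep]
    · rw [List.filter_cons_of_neg (by simp [hx])]
      rw [PySem.Dict.get?_insert_of_ne (hne := fun h => hx h.symm)]

theorem gstep_foldl (t : List Int) (c m : Int) :
    t.foldl gstep (some (c, m)) = some (c + t.length, t.foldl min m) := by
  induction t generalizing c m with
  | nil => simp
  | cons x s ih => simp [gstep, ih]; ring

theorem bBuckets_keys (nums : List Int) (space : Int) :
    (bBuckets nums space).keys = PySem.Set.ofList (nums.map (fun n => PySem.Int.mod n space)) := by
  unfold bBuckets
  rw [PySem.Dict.keys_foldl_insert_key]
  simp [PySem.Set.update_nil_left]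

theorem bBuckets_nodup (nums : List Int) (space : Int) : (bBuckets nums space).keys.Nodup := by
  unfold bBuckets
  exact PySem.Dict.nodup_keys_foldl_insert_key _ _ _ _ (by simp [PySem.Dict.keys_empty])

theorem bSel_foldl (vs : List (Int × Int)) (b0 : Int × Int) :
    ∃ b, vs.foldl bSel (some b0) = some b ∧ b ∈ b0 :: vs ∧
      (∀ p ∈ b0 :: vs, p.1 ≤ b.1) ∧ (∀ p ∈ b0 :: vs, p.1 = b.1 → b.2 ≤ p.2) := by
  induction vs generalizing b0 with
  | nil =>
    exact ⟨b0, by simp, by simp, by simp, by simp⟩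
  | cons v t ih =>
    simp only [List.foldl_cons]
    by_cases hc : b0.1 < v.1 ∨ (v.1 = b0.1 ∧ v.2 < b0.2)
    · have hstep : bSel (some b0) v = some v := by simp [bSel, hc]
      rw [hstep]
      obtain ⟨b, hb, hmem, hmax, hmin⟩ := ih v
      have hv1 : v.1 ≤ b.1 := hmax v (by simp)
      refine ⟨b, hb, ?_, ?_, ?_⟩
      · rcases List.mem_cons.mp hmem with h | h
        · simp [h]
        · simp [h]
      · intro p hp
        rcases List.mem_cons.mp hp with rfl | hp
        · rcases hc with h | ⟨h1, _⟩ <;> omega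
        · exact hmax p hp
      · intro p hp hpb
        rcases List.mem_cons.mp hp with rfl | hp
        · rcases hc with h | ⟨h1, h2⟩
          · omega
          · have := hmin v (by simp) (by omega)
            omega
        · exact hmin p hp hpb
    · have hstep : bSel (some b0) v = some b0 := by simp [bSel, hc]
      rw [hstep]
      have hc1 : v.1 ≤ b0.1 := le_of_not_gt (fun h => hc (Or.inl h))
      have hc2 : v.1 = b0.1 → b0.2 ≤ v.2 := fun he => le_of_not_gt (fun h => hc (Or.inr ⟨he, h⟩))
      obtain ⟨b, hb, hmem, hmax, hmin⟩ := ih b0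
      have h0 : b0.1 ≤ b.1 := hmax b0 (by simp)
      refine ⟨b, hb, ?_, ?_, ?_⟩
      · rcases List.mem_cons.mp hmem with h | h
        · simp [h]
        · simp [h]
      · intro p hp
        rcases List.mem_cons.mp hp with rfl | hp
        · omega
        · rcases List.mem_cons.mp hp with rfl | hp
          · omega
          · exact hmax p (by simp [hp])
      · intro p hp hpb
        rcases List.mem_cons.mp hp with rfl | hp
        · exact hmin p (by simp) hpb
        · rcases List.mem_cons.mp hp with rfl | hp
          · have hvb0 : p.1 = b0.1 := by omega
            have := hmin b0 (by simp) (by omega)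
            have := hc2 hvb0
            omega
          · exact hmin p (by simp [hp]) hpb

theorem ifFoldl_filter (d : PySem.Dict Int Int) (space M : Int) (l : List Int) (o : Option Int) :
    l.foldl (fun ans num => if d.getD (PySem.Int.mod num space) 0 = M then
        some (ans.elim num (fun a => min a num)) else ans) o
    = (l.filter (fun n => decide (d.getD (PySem.Int.mod n space) 0 = M))).foldl
        (fun o n => some (o.elim n (fun a => min a n))) o := by
  induction l generalizing o with
  | nil => rfl
  | cons x t ih =>
    by_cases hx : d.getD (PySem.Int.mod x space) 0 = M
    · rw [List.foldl_cons, if_pos hx, ih, List.filter_cons_of_pos (by simp [hx]), List.foldl_cons]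
    · rw [List.foldl_cons, if_neg hx, ih, List.filter_cons_of_neg (by simp [hx])]

theorem mstep_foldl (t : List Int) (a : Int) :
    t.foldl (fun o n => some (o.elim n (fun a => min a n))) (some a) = some (t.foldl min a) := by
  induction t generalizing a with
  | nil => rfl
  | cons x s ih => simp [ih]

theorem foldlmin_mem (x : Int) (t : List Int) : t.foldl min x ∈ x :: t :=
  PySem.List.min?_mem (PySem.List.min?_id_cons (x := x) (t := t))

theorem foldlmin_le (x : Int) (t : List Int) : ∀ y ∈ x :: t, t.foldl min x ≤ y :=
  PySem.List.min?_isMin (PySem.List.min?_id_cons (x := x) (t := t))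


theorem bBuckets_getD (nums : List Int) (space r : Int)
    (hr : r ∈ nums.map (fun n => PySem.Int.mod n space)) :
    ∃ x t, nums.filter (fun n => PySem.Int.mod n space == r) = x :: t ∧
      (bBuckets nums space).getD r (0, 0)
        = (((nums.map (fun n => PySem.Int.mod n space)).count r : Int), t.foldl min x) := by
  obtain ⟨n0, hn0, hk⟩ := List.mem_map.mp hr
  have hfl : n0 ∈ nums.filter (fun n => PySem.Int.mod n space == r) :=
    List.mem_filter.mpr ⟨hn0, by simp [hk]⟩
  obtain ⟨x, t, hxt⟩ := List.exists_cons_of_ne_nil (List.ne_nil_of_mem hfl)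
  refine ⟨x, t, hxt, ?_⟩
  have hget : (bBuckets nums space).get? r = (x :: t).foldl gstep none := by
    unfold bBuckets
    rw [bBuckets_get?_aux, PySem.Dict.get?_empty, hxt]
  rw [List.foldl_cons] at hget
  have hg1 : gstep none x = some (1, x) := rfl
  rw [hg1, gstep_foldl] at hget
  have hcount : ((nums.map (fun n => PySem.Int.mod n space)).count r : Int)
      = 1 + (t.length : Int) := by
    have h1 : (nums.map (fun n => PySem.Int.mod n space)).count r
        = (nums.filter (fun n => PySem.Int.mod n space == r)).length := by
      simp only [List.count, List.countP_eq_length_filter, List.filter_map, List.length_map]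
      rfl
    rw [h1, hxt]
    simp
    omega
  rw [PySem.Dict.getD_eq_get?_getD, hget, Option.getD_some, hcount]

theorem mstep_foldl_cons (x : Int) (t : List Int) :
    (x :: t).foldl (fun o n => some (o.elim n (fun a => min a n))) none = some (t.foldl min x) := by
  rw [List.foldl_cons]
  exact mstep_foldl t x

theorem destroyTargets_main (nums : List Int) (space : Int) (hne : nums ≠ []) :
    destroyTargets nums space = destroyTargets_alt nums space := by
  have hvA : (aCount nums space).values
      = (PySem.Set.ofList (nums.map (fun n => PySem.Int.mod n space))).map
          (fun r => ((nums.map (fun n => PySem.Int.mod n space)).count r : Int)) := by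
    rw [PySem.Dict.values_eq_map_keys _ (aCount_nodup nums space) 0, aCount_keys]
    exact List.map_congr_left (fun r _ => aCount_getD nums space r)
  have hksne : PySem.Set.ofList (nums.map (fun n => PySem.Int.mod n space)) ≠ [] := by
    obtain ⟨n0, t0, rfl⟩ := List.exists_cons_of_ne_nil hne
    have hm : PySem.Int.mod n0 space
        ∈ PySem.Set.ofList ((n0 :: t0).map (fun n => PySem.Int.mod n space)) :=
      (PySem.Set.mem_ofList _ _).mpr (by simp)
    exact List.ne_nil_of_mem hm
  have hvAne : (aCount nums space).values ≠ [] := by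
    rw [hvA]; simpa using hksne
  obtain ⟨M, hM⟩ : ∃ M, PySem.List.max? (aCount nums space).values (fun x => x) = some M := by
    cases h : PySem.List.max? (aCount nums space).values (fun x => x) with
    | none => exact absurd ((PySem.List.max?_eq_none_iff _ _).mp h) hvAne
    | some M => exact ⟨M, rfl⟩
  have hMmem : M ∈ (aCount nums space).values := PySem.List.max?_mem hM
  have hMub : ∀ y ∈ (aCount nums space).values, y ≤ M :=
    fun y hy => PySem.List.max?_isMax hM y hy
  have hvB : (bBuckets nums space).values
      = (PySem.Set.ofList (nums.map (fun n => PySem.Int.mod n space))).map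
          (fun r => (bBuckets nums space).getD r (0, 0)) := by
    rw [PySem.Dict.values_eq_map_keys _ (bBuckets_nodup nums space) (0, 0), bBuckets_keys]
  have hvBne : (bBuckets nums space).values ≠ [] := by
    rw [hvB]; simpa using hksne
  obtain ⟨v, vt, hvvt⟩ := List.exists_cons_of_ne_nil hvBne
  obtain ⟨b, hb, hbmem, hbmax, hbmin⟩ := bSel_foldl vt v
  have hfold : (bBuckets nums space).values.foldl bSel none = some b := by
    rw [hvvt, List.foldl_cons]
    exact hb
  have hchar : ∀ p ∈ (bBuckets nums space).values, ∃ r x t,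
      r ∈ nums.map (fun n => PySem.Int.mod n space) ∧
      nums.filter (fun n => PySem.Int.mod n space == r) = x :: t ∧
      p = (((nums.map (fun n => PySem.Int.mod n space)).count r : Int), t.foldl min x) := by
    intro p hp
    rw [hvB] at hp
    obtain ⟨r, hr, hpr⟩ := List.mem_map.mp hp
    have hr' : r ∈ nums.map (fun n => PySem.Int.mod n space) := (PySem.Set.mem_ofList _ _).mp hr
    obtain ⟨x, t, hxt, hgd⟩ := bBuckets_getD nums space r hr'
    exact ⟨r, x, t, hr', hxt, by rw [← hpr, hgd]⟩
  obtain ⟨rb, xb, tb, hrb, hflb, hbeq⟩ := hchar b (by rw [hvvt]; exact hbmem)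
  have hb1 : b.1 = ((nums.map (fun n => PySem.Int.mod n space)).count rb : Int) := by
    rw [hbeq]
  have hb2 : b.2 = tb.foldl min xb := by
    rw [hbeq]
  have hb1M : b.1 = M := by
    have h1 : b.1 ≤ M := by
      have hm : ((nums.map (fun n => PySem.Int.mod n space)).count rb : Int)
          ∈ (aCount nums space).values := by
        rw [hvA]
        exact List.mem_map.mpr ⟨rb, (PySem.Set.mem_ofList _ _).mpr hrb, rfl⟩
      have := hMub _ hm
      omega
    have h2 : M ≤ b.1 := by
      rw [hvA] at hMmem
      obtain ⟨rM, hrM, hMeq⟩ := List.mem_map.mp hMmem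
      obtain ⟨xM, tM, hflM, hgdM⟩ := bBuckets_getD nums space rM ((PySem.Set.mem_ofList _ _).mp hrM)
      have hpM : (bBuckets nums space).getD rM (0, 0) ∈ v :: vt := by
        rw [← hvvt, hvB]
        exact List.mem_map.mpr ⟨rM, hrM, rfl⟩
      have h := hbmax _ hpM
      rw [hgdM] at h
      simp only at h hMeq
      omega
    omega
  -- evaluate both ports
  simp only [destroyTargets, destroyTargets_alt]
  have hMgd : (PySem.List.max? (aCount nums space).values (fun x => x)).getD 0 = M := by
    rw [hM]
    rfl
  rw [hMgd, hfold]
  simp only [Option.elim_some]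
  rw [ifFoldl_filter]
  have hfc : nums.filter (fun n => decide ((aCount nums space).getD (PySem.Int.mod n space) 0 = M))
      = nums.filter (fun n =>
          decide (((nums.map (fun m => PySem.Int.mod m space)).count (PySem.Int.mod n space) : Int) = M)) :=
    List.filter_congr (fun n _ => by simp [aCount_getD])
  rw [hfc]
  -- the minimum of B's winning bucket belongs to A's filtered list
  have hmnb_fl : tb.foldl min xb ∈ nums.filter (fun n => PySem.Int.mod n space == rb) := by
    rw [hflb]; exact foldlmin_mem xb tb
  obtain ⟨hmnb_nums, hmnb_k⟩ := List.mem_filter.mp hmnb_fl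
  have hmnb_keq : PySem.Int.mod (tb.foldl min xb) space = rb := by simpa using hmnb_k
  have hmnbQ : tb.foldl min xb ∈ nums.filter (fun n =>
      decide (((nums.map (fun m => PySem.Int.mod m space)).count (PySem.Int.mod n space) : Int) = M)) := by
    refine List.mem_filter.mpr ⟨hmnb_nums, ?_⟩
    rw [hmnb_keq]
    simp only [decide_eq_true_eq]
    omega
  obtain ⟨q, qt, hqqt⟩ := List.exists_cons_of_ne_nil (List.ne_nil_of_mem hmnbQ)
  rw [hqqt, mstep_foldl_cons, Option.getD_some]
  -- A's answer is a member of the filtered list, and a lower bound of it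
  have haAns_mem := foldlmin_mem q qt
  have haAns_le := foldlmin_le q qt
  have hle1 : qt.foldl min q ≤ tb.foldl min xb := haAns_le _ (hqqt ▸ hmnbQ)
  have hQ := hqqt ▸ haAns_mem
  obtain ⟨hA_nums, hA_cnt⟩ := List.mem_filter.mp hQ
  simp only [decide_eq_true_eq] at hA_cnt
  have hrA : PySem.Int.mod (qt.foldl min q) space ∈ nums.map (fun n => PySem.Int.mod n space) :=
    List.mem_map.mpr ⟨_, hA_nums, rfl⟩
  obtain ⟨x', t', hfl', hgd'⟩ := bBuckets_getD nums space _ hrA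
  have hp'mem : (bBuckets nums space).getD (PySem.Int.mod (qt.foldl min q) space) (0, 0) ∈ v :: vt := by
    rw [← hvvt, hvB]
    exact List.mem_map.mpr ⟨_, (PySem.Set.mem_ofList _ _).mpr hrA, rfl⟩
  have hp'1 : ((bBuckets nums space).getD (PySem.Int.mod (qt.foldl min q) space) (0, 0)).1 = b.1 := by
    rw [hgd']
    simp only
    omega
  have hble := hbmin _ hp'mem hp'1
  rw [hgd'] at hble
  simp only at hble
  have hin' : qt.foldl min q ∈ x' :: t' := by
    rw [← hfl']
    exact List.mem_filter.mpr ⟨hA_nums, by simp⟩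
  have hle2 : t'.foldl min x' ≤ qt.foldl min q := foldlmin_le x' t' _ hin'
  omega

-- ===== VERDICT (by name: the statement is the Claim_ definition above) =====
theorem destroyTargets_spec : Claim_equal_destroyTargets := by
  unfold Claim_equal_destroyTargets
  intro nums space _ hpre
  unfold Pre_destroyTargets at hpre
  unfold Spec_destroyTargets
  exact destroyTargets_main nums space hpre.1
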